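-- pv_equiv track=rewrite | github.com/aynader/EyeBLAST | Plain EyeBLAST/Fast_EyeBLAST_IVT.py | _greedy_chain_seeds
-- ===== SOURCE A (Python) =====
-- from collections import defaultdict, Counter
--
-- def _greedy_chain_seeds(seeds, len1, len2):
--     """
--     Chain seeds using greedy diagonal algorithm
--
--     Parameters:
--     -----------
--     seeds : list
--         List of (pos1, pos2) tuples for seed anchors
--     len1, len2 : int
--         Lengths of the two scanpaths
--
--     Returns:
--     --------
--     list
--         List of (pos1, pos2) tuples for aligned positions
--     """
--     if not seeds:
--         return []
--
--     # Calculate diagonal for each seed (pos2 - pos1)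
--     # Group seeds by diagonal
--     diagonals = defaultdict(list)
--     for pos1, pos2 in seeds:
--         diag = pos2 - pos1
--         diagonals[diag].append((pos1, pos2))
--
--     # Find the diagonal with the most seeds
--     best_diag, best_seeds = max(diagonals.items(), key=lambda x: len(x[1]))
--
--     # Sort seeds on this diagonal by position
--     best_seeds.sort()
--
--     # Build chain greedily
--     chain = [best_seeds[0]]
--     for seed in best_seeds[1:]:
--         # If this seed extends the chain, add it
--         if seed[0] > chain[-1][0] and seed[1] > chain[-1][1]:
--             chain.append(seed)
--
--     return chain
-- ===== SOURCE B (Python) =====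
-- from collections import Counter
--
-- def _greedy_chain_seeds(seeds, len1, len2):
--     """Chain seed anchors: pick the densest diagonal (first-seen wins ties),
--     then return its distinct seeds in sorted order."""
--     if not seeds:
--         return []
--     counts = Counter(p2 - p1 for p1, p2 in seeds)
--     best = max(counts, key=counts.get)
--     return sorted({(p1, p2) for p1, p2 in seeds if p2 - p1 == best})
-- ===== Notes on version B (the rewrite author's own statement) =====
-- stated objective: simpler
-- what changed: Replaces the defaultdict group-by plus the greedy chain-extension loop with a Counter of diagonals and a single sorted(set(...)) of the seeds on the densest diagonal: on one diagonal the greedy chain is exactly the sorted deduplication.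
import Mathlib
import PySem

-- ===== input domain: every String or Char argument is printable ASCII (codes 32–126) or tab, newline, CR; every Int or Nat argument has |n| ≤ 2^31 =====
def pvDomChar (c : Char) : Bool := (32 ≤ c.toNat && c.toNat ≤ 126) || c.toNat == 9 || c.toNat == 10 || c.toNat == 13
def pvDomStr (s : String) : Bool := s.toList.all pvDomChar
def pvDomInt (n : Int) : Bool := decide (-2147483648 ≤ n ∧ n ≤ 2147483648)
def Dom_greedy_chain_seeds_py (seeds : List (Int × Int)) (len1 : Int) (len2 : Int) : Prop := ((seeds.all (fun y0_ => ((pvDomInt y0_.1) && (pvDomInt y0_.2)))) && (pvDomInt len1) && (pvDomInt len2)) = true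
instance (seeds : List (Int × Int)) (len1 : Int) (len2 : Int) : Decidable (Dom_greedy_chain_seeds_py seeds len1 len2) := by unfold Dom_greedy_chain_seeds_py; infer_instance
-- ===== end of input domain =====

-- B replaces A's defaultdict grouping + greedy chain-extension loop with a Counter of
-- diagonals and sorted(set(...)) of the densest diagonal's seeds (objective: simpler).

-- ===== PORT A =====
def greedy_chain_seeds_py (seeds : List (Int × Int)) (len1 : Int) (len2 : Int) : List (Int × Int) :=
  if seeds = [] then []
  else
    -- diagonals = defaultdict(list); for pos1, pos2 in seeds: diagonals[pos2-pos1].append((pos1,pos2))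
    let diagonals : PySem.Dict Int (List (Int × Int)) :=
      seeds.foldl (fun d p => d.modify (p.2 - p.1) [] (fun v => v ++ [p])) PySem.Dict.empty
    -- best_diag, best_seeds = max(diagonals.items(), key=lambda x: len(x[1]))
    match PySem.List.max? diagonals.items (fun x => x.2.length) with
    | none => []   -- unreachable: seeds ≠ [] so the dict is nonempty (Python max would raise on empty)
    | some (_, best_seeds) =>
      -- best_seeds.sort()  (Python sorts the (pos1,pos2) tuples lexicographically)
      let bs := PySem.List.sorted2 best_seeds (fun p => p.1) (fun p => p.2)
      match bs with
      | [] => []   -- unreachable: best_seeds is nonempty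
      | h :: t =>
        -- chain = [best_seeds[0]]; for seed in best_seeds[1:]: if seed[0] > chain[-1][0] and seed[1] > chain[-1][1]: chain.append(seed)
        t.foldl (fun chain seed =>
          if (PySem.List.pyGetD chain (-1) (0, 0)).1 < seed.1 ∧ (PySem.List.pyGetD chain (-1) (0, 0)).2 < seed.2
          then chain ++ [seed] else chain) [h]

-- ===== PORT B =====
def greedy_chain_seeds_py_alt (seeds : List (Int × Int)) (len1 : Int) (len2 : Int) : List (Int × Int) :=
  if seeds = [] then []
  else
    -- counts = Counter(p2 - p1 for p1, p2 in seeds)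
    let counts : PySem.Dict Int Int := PySem.Dict.counter (seeds.map (fun p => p.2 - p.1))
    -- best = max(counts, key=counts.get)
    match PySem.List.max? counts.keys (fun k => counts.getD k 0) with
    | none => []   -- unreachable: seeds ≠ []
    | some best =>
      -- sorted({(p1, p2) for p1, p2 in seeds if p2 - p1 == best})
      PySem.List.sorted2 (PySem.Set.ofList (seeds.filter (fun p => p.2 - p.1 == best)))
        (fun p => p.1) (fun p => p.2)

-- ===== PRECONDITION & SPEC =====
def Spec_greedy_chain_seeds_py (seeds : List (Int × Int)) (len1 : Int) (len2 : Int) (out : List (Int × Int)) : Prop := out = greedy_chain_seeds_py_alt seeds len1 len2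
instance (seeds : List (Int × Int)) (len1 : Int) (len2 : Int) (out : List (Int × Int)) : Decidable (Spec_greedy_chain_seeds_py seeds len1 len2 out) := by unfold Spec_greedy_chain_seeds_py; infer_instance

-- ===== CLAIM (what is proved, stated in full; the proofs are below) =====
def Claim_equal_greedy_chain_seeds_py : Prop := ∀ (seeds : List (Int × Int)) (len1 : Int) (len2 : Int), Dom_greedy_chain_seeds_py seeds len1 len2 → Spec_greedy_chain_seeds_py seeds len1 len2 (greedy_chain_seeds_py seeds len1 len2)

-- ===== LEMMAS AND PROOFS =====

-- the Python lexicographic tuple order used by sorted2 with keys fst/snd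
def pvLex (a b : Int × Int) : Bool :=
  decide (a.1 < b.1) || (!decide (b.1 < a.1) && decide (a.2 < b.2))

-- "a ≤ b" in that order
def pvRle (a b : Int × Int) : Prop := pvLex b a = false

theorem pvSorted2_eq (xs : List (Int × Int)) :
    PySem.List.sorted2 xs (fun p => p.1) (fun p => p.2) =
      xs.foldl (fun acc x => PySem.List.insertBy pvLex x acc) [] := rfl

theorem pvLex_asymm {a b : Int × Int} (h : pvLex a b = true) : pvLex b a = false := by
  simp [pvLex] at *; omega

theorem pvLex_resolve {x y z : Int × Int} (h1 : pvLex x y = true) (h2 : pvLex z y = false) :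
    pvLex z x = false := by
  simp [pvLex] at *; omega

theorem pvRle_fst_le {a b : Int × Int} (h : pvRle a b) : a.1 ≤ b.1 := by
  simp [pvRle, pvLex] at h; omega

theorem pvInsertBy_pairwise (x : Int × Int) (acc : List (Int × Int))
    (h : acc.Pairwise pvRle) : (PySem.List.insertBy pvLex x acc).Pairwise pvRle := by
  induction acc with
  | nil => simp [PySem.List.insertBy]
  | cons y ys ih =>
    rw [List.pairwise_cons] at h
    obtain ⟨hy, hys⟩ := h
    rw [PySem.List.insertBy]
    by_cases hxy : pvLex x y = true
    · rw [if_pos hxy]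
      refine List.Pairwise.cons ?_ (List.Pairwise.cons hy hys)
      intro z hz
      rcases List.mem_cons.mp hz with rfl | hz
      · exact pvLex_asymm hxy
      · exact pvLex_resolve hxy (hy z hz)
    · rw [if_neg hxy]
      refine List.Pairwise.cons ?_ (ih hys)
      intro w hw
      rcases (PySem.List.mem_insertBy _ _ _ _).mp hw with rfl | hw
      · exact Bool.eq_false_iff.mpr hxy
      · exact hy w hw

theorem pvFoldl_pairwise (l : List (Int × Int)) :
    ∀ acc : List (Int × Int), acc.Pairwise pvRle →
      (l.foldl (fun acc x => PySem.List.insertBy pvLex x acc) acc).Pairwise pvRle := by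
  induction l with
  | nil => intro acc h; exact h
  | cons a t ih => intro acc h; exact ih _ (pvInsertBy_pairwise a acc h)

theorem pvSorted2_pairwise (xs : List (Int × Int)) :
    (PySem.List.sorted2 xs (fun p => p.1) (fun p => p.2)).Pairwise pvRle := by
  rw [pvSorted2_eq]; exact pvFoldl_pairwise xs [] (by simp)

-- max? over a mapped list
theorem pvMax?_map {α β κ : Type} [LT κ] [DecidableLT κ] (f : α → β) (key : β → κ) (l : List α) :
    PySem.List.max? (l.map f) key = (PySem.List.max? l (fun x => key (f x))).map f := by
  unfold PySem.List.max?
  rw [List.foldl_map]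
  suffices h : ∀ acc : Option α,
      l.foldl (fun acc x => match acc with
        | none => some (f x)
        | some m => if key m < key (f x) then some (f x) else some m) (acc.map f) =
      (l.foldl (fun acc x => match acc with
        | none => some x
        | some m => if key (f m) < key (f x) then some x else some m) acc).map f by
    exact h none
  induction l with
  | nil => intro acc; rfl
  | cons a t ih =>
    intro acc
    simp only [List.foldl_cons]
    cases acc with
    | none => exact ih (some a)
    | some m =>
      by_cases hc : key (f m) < key (f a)
      · simp only [Option.map_some, if_pos hc]; exact ih (some a)
      · simp only [Option.map_some, if_neg hc]; exact ih (some m)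

-- max? only depends on the key's values
theorem pvMax?_congr {α κ : Type} [LT κ] [DecidableLT κ] (k1 k2 : α → κ) (l : List α)
    (h : ∀ x, k1 x = k2 x) : PySem.List.max? l k1 = PySem.List.max? l k2 := by
  unfold PySem.List.max?
  congr 1
  funext acc x
  cases acc with
  | none => rfl
  | some m =>
    show (if k1 m < k1 x then some x else some m) = (if k2 m < k2 x then some x else some m)
    rw [h m, h x]

-- casting a Nat key to Int does not change max?
theorem pvMax?_cast {α : Type} (kn : α → Nat) (l : List α) :
    PySem.List.max? l (fun x => ((kn x : Nat) : Int)) = PySem.List.max? l kn := by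
  unfold PySem.List.max?
  congr 1
  funext acc x
  cases acc with
  | none => rfl
  | some m =>
    show (if ((kn m : Nat) : Int) < ((kn x : Nat) : Int) then some x else some m) =
      (if kn m < kn x then some x else some m)
    simp [Nat.cast_lt]

-- A's greedy chain loop over a key-sorted same-diagonal list: invariant
theorem pvChain (c : Int) (t : List (Int × Int)) :
    ∀ (chain : List (Int × Int)) (last : Int × Int),
      PySem.List.pyGetD chain (-1) (0, 0) = last →
      last ∈ chain →
      chain.Pairwise (fun a b => a.1 < b.1) →
      (∀ x ∈ chain, x.1 ≤ last.1) →
      (∀ p ∈ chain, p.2 = p.1 + c) →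
      (∀ p ∈ t, p.2 = p.1 + c) →
      (∀ p ∈ t, last.1 ≤ p.1) →
      t.Pairwise (fun a b => a.1 ≤ b.1) →
      (t.foldl (fun chain seed =>
          if (PySem.List.pyGetD chain (-1) (0, 0)).1 < seed.1 ∧
             (PySem.List.pyGetD chain (-1) (0, 0)).2 < seed.2
          then chain ++ [seed] else chain) chain).Pairwise (fun a b => a.1 < b.1) ∧
      (∀ x, x ∈ (t.foldl (fun chain seed =>
          if (PySem.List.pyGetD chain (-1) (0, 0)).1 < seed.1 ∧
             (PySem.List.pyGetD chain (-1) (0, 0)).2 < seed.2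
          then chain ++ [seed] else chain) chain) ↔ x ∈ chain ∨ x ∈ t) := by
  induction t with
  | nil =>
    intro chain last _ _ hpw _ _ _ _ _
    exact ⟨hpw, fun x => by simp⟩
  | cons s t ih =>
    intro chain last hlastv hlastmem hpw hmax hdiagC hdiagT hge hT
    rw [List.pairwise_cons] at hT
    obtain ⟨hTs, hT⟩ := hT
    simp only [List.foldl_cons, hlastv]
    by_cases hcond : last.1 < s.1 ∧ last.2 < s.2
    · rw [if_pos hcond]
      have hres := ih (chain ++ [s]) s
        (PySem.List.pyGetD_neg_one_append_singleton chain s (0, 0))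
        (by simp)
        (by rw [List.pairwise_append]
            exact ⟨hpw, List.pairwise_singleton _ _,
              fun a ha b hb => by rw [List.mem_singleton] at hb; subst hb
                                  exact lt_of_le_of_lt (hmax a ha) hcond.1⟩)
        (by intro x hx
            rcases List.mem_append.mp hx with hx | hx
            · exact le_of_lt (lt_of_le_of_lt (hmax x hx) hcond.1)
            · rw [List.mem_singleton] at hx; subst hx; exact le_refl _)
        (by intro p hp
            rcases List.mem_append.mp hp with hp | hp
            · exact hdiagC p hp
            · rw [List.mem_singleton] at hp; subst hp; exact hdiagT p List.mem_cons_self)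
        (fun p hp => hdiagT p (List.mem_cons_of_mem _ hp))
        hTs
        hT
      refine ⟨hres.1, fun x => ?_⟩
      rw [hres.2 x]
      simp [List.mem_append, or_assoc]
    · rw [if_neg hcond]
      have hs1 : last.1 ≤ s.1 := hge s List.mem_cons_self
      have hsd : s.2 = s.1 + c := hdiagT s List.mem_cons_self
      have hld : last.2 = last.1 + c := hdiagC last hlastmem
      have hseq : s = last := by
        have h1 : s.1 = last.1 := by omega
        have h2 : s.2 = last.2 := by omega
        exact Prod.ext h1 h2
      have hres := ih chain last hlastv hlastmem hpw hmax hdiagC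
        (fun p hp => hdiagT p (List.mem_cons_of_mem _ hp))
        (fun p hp => hge p (List.mem_cons_of_mem _ hp))
        hT
      refine ⟨hres.1, fun x => ?_⟩
      rw [hres.2 x]
      subst hseq
      constructor
      · rintro (h | h)
        · exact Or.inl h
        · exact Or.inr (List.mem_cons_of_mem _ h)
      · rintro (h | h)
        · exact Or.inl h
        · rcases List.mem_cons.mp h with rfl | h
          · exact Or.inl hlastmem
          · exact Or.inr h

-- two strictly fst-sorted lists with the same members are equal
theorem pvStrictUnique (l1 : List (Int × Int)) :
    ∀ l2 : List (Int × Int),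
      l1.Pairwise (fun a b => a.1 < b.1) → l2.Pairwise (fun a b => a.1 < b.1) →
      (∀ x, x ∈ l1 ↔ x ∈ l2) → l1 = l2 := by
  induction l1 with
  | nil =>
    intro l2 _ _ hmem
    cases l2 with
    | nil => rfl
    | cons h2 t2 => exact absurd ((hmem h2).mpr (List.mem_cons_self)) (List.not_mem_nil)
  | cons h1 t1 ih =>
    intro l2 hp1 hp2 hmem
    cases l2 with
    | nil => exact absurd ((hmem h1).mp (List.mem_cons_self)) (List.not_mem_nil)
    | cons h2 t2 =>
      rw [List.pairwise_cons] at hp1 hp2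
      obtain ⟨hh1, ht1⟩ := hp1
      obtain ⟨hh2, ht2⟩ := hp2
      have hhd : h1 = h2 := by
        rcases List.mem_cons.mp ((hmem h1).mp List.mem_cons_self) with h | h
        · exact h
        · rcases List.mem_cons.mp ((hmem h2).mpr List.mem_cons_self) with h' | h'
          · exact h'.symm
          · have := hh1 h2 h'
            have := hh2 h1 h
            omega
      subst hhd
      have htl : ∀ x, x ∈ t1 ↔ x ∈ t2 := by
        intro x
        constructor
        · intro hx
          rcases List.mem_cons.mp ((hmem x).mp (List.mem_cons_of_mem _ hx)) with rfl | h
          · exact absurd (hh1 x hx) (lt_irrefl _)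
          · exact h
        · intro hx
          rcases List.mem_cons.mp ((hmem x).mpr (List.mem_cons_of_mem _ hx)) with rfl | h
          · exact absurd (hh2 x hx) (lt_irrefl _)
          · exact h
      rw [ih t2 ht1 ht2 htl]


-- ===== VERDICT (by name: the statement is the Claim_ definition above) =====
theorem greedy_chain_seeds_py_spec : Claim_equal_greedy_chain_seeds_py := by
  intro seeds len1 len2 _
  unfold Spec_greedy_chain_seeds_py
  by_cases hs : seeds = []
  · simp [greedy_chain_seeds_py, greedy_chain_seeds_py_alt, hs]
  · simp only [greedy_chain_seeds_py, greedy_chain_seeds_py_alt, if_neg hs]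
    set D := seeds.foldl (fun d p => d.modify (p.2 - p.1) [] (fun v => v ++ [p]))
      PySem.Dict.empty with hD
    have hkeys' : D.keys = PySem.Set.update PySem.Dict.empty.keys
        (seeds.map (fun p : Int × Int => p.2 - p.1)) :=
      PySem.Dict.keys_foldl_modify_key seeds (fun p : Int × Int => p.2 - p.1) []
        (fun _ p => fun v => v ++ [p]) PySem.Dict.empty
    have hupd : PySem.Set.update ([] : List Int) (seeds.map (fun p : Int × Int => p.2 - p.1))
        = PySem.Set.ofList (seeds.map (fun p : Int × Int => p.2 - p.1)) := by
      rw [PySem.Set.ofList_eq_foldl]; rfl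
    have hkeys : D.keys = PySem.Set.ofList (seeds.map (fun p : Int × Int => p.2 - p.1)) := by
      rw [hkeys', PySem.Dict.keys_empty, hupd]
    have hnodup : D.keys.Nodup :=
      PySem.Dict.nodup_keys_foldl_modify_key seeds (fun p : Int × Int => p.2 - p.1) []
        (fun _ p => fun v => v ++ [p]) PySem.Dict.empty PySem.Dict.nodup_keys_empty
    have hgetD : ∀ k : Int, D.getD k [] = seeds.filter (fun p => p.2 - p.1 == k) := by
      intro k
      have h1 : D = (seeds.map (fun p : Int × Int => ((p.2 - p.1 : Int), p))).foldl
          (fun d q => d.modify q.1 [] (fun v => v ++ [q.2])) PySem.Dict.empty := by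
        rw [hD, List.foldl_map]
      rw [h1, PySem.Dict.getD_foldl_modify_append, PySem.Dict.getD_empty, List.nil_append,
        List.filter_map]
      simp only [Function.comp_def, List.map_map]
      simp
    have hitems : D.items = D.keys.map (fun k => (k, D.getD k [])) :=
      PySem.Dict.items_eq_map_keys D hnodup []
    -- the Nat-valued key both maxima are taken over
    set kA : Int → Nat := fun k => (seeds.filter (fun p => p.2 - p.1 == k)).length with hkA
    have hmaxA : PySem.List.max? D.items (fun x => x.2.length)
        = (PySem.List.max? D.keys kA).map (fun k => (k, D.getD k [])) := by
      rw [hitems, pvMax?_map]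
      congr 1
      refine pvMax?_congr _ _ _ (fun k => ?_)
      show (D.getD k []).length = kA k
      rw [hgetD k, hkA]
    have hcount : ∀ k : Int, List.count k (seeds.map (fun p : Int × Int => p.2 - p.1)) = kA k := by
      intro k
      rw [List.count_eq_countP, List.countP_map, hkA, List.countP_eq_length_filter]
      rfl
    have hmaxB : PySem.List.max? (PySem.Dict.counter
          (seeds.map (fun p : Int × Int => p.2 - p.1))).keys
          (fun k => (PySem.Dict.counter (seeds.map (fun p : Int × Int => p.2 - p.1))).getD k 0)
        = PySem.List.max? D.keys kA := by
      rw [PySem.Dict.keys_counter, ← hkeys]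
      rw [pvMax?_congr _ (fun k => ((List.count k (seeds.map (fun p : Int × Int => p.2 - p.1)) : Nat) : Int)) _
        (fun k => by rw [PySem.Dict.getD_counter])]
      rw [pvMax?_cast]
      exact pvMax?_congr _ _ _ hcount
    -- the shared argmax diagonal
    have hkeysne : D.keys ≠ [] := by
      obtain ⟨p, rest, rfl⟩ := List.exists_cons_of_ne_nil hs
      rw [hkeys, List.map_cons, PySem.Set.ofList_cons]
      exact List.cons_ne_nil _ _
    obtain ⟨best, hbest⟩ : ∃ best, PySem.List.max? D.keys kA = some best := by
      cases hb : PySem.List.max? D.keys kA with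
      | none => exact absurd ((PySem.List.max?_eq_none_iff _ _).mp hb) hkeysne
      | some b => exact ⟨b, rfl⟩
    rw [hmaxA, hmaxB, hbest]
    simp only [Option.map_some]
    rw [hgetD best]
    set F := seeds.filter (fun p => p.2 - p.1 == best) with hF
    show (match PySem.List.sorted2 F (fun p => p.1) (fun p => p.2) with
      | [] => []
      | h :: t => t.foldl (fun chain seed =>
          if (PySem.List.pyGetD chain (-1) (0, 0)).1 < seed.1 ∧
             (PySem.List.pyGetD chain (-1) (0, 0)).2 < seed.2
          then chain ++ [seed] else chain) [h])
      = PySem.List.sorted2 (PySem.Set.ofList F) (fun p => p.1) (fun p => p.2)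
    -- F is nonempty and lies on the single diagonal `best`
    have hbestmem : best ∈ D.keys := PySem.List.max?_mem hbest
    have hFne : F ≠ [] := by
      rw [hkeys] at hbestmem
      rw [PySem.Set.mem_ofList] at hbestmem
      obtain ⟨p, hp, hgp⟩ := List.mem_map.mp hbestmem
      intro hFnil
      have : p ∈ F := List.mem_filter.mpr ⟨hp, by simp [hgp]⟩
      rw [hFnil] at this
      exact List.not_mem_nil this
    have hFdiag : ∀ p ∈ F, p.2 = p.1 + best := by
      intro p hp
      have := (List.mem_filter.mp hp).2
      rw [beq_iff_eq] at this
      omega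
    have hSmem : ∀ x, x ∈ PySem.List.sorted2 F (fun p => p.1) (fun p => p.2) ↔ x ∈ F :=
      fun x => (PySem.List.sorted2_perm F _ _ false).mem_iff
    have hSp := pvSorted2_pairwise F
    -- right-hand side facts
    have hRmem : ∀ x, x ∈ PySem.List.sorted2 (PySem.Set.ofList F) (fun p => p.1) (fun p => p.2)
        ↔ x ∈ F := by
      intro x
      rw [(PySem.List.sorted2_perm (PySem.Set.ofList F) _ _ false).mem_iff,
        PySem.Set.mem_ofList]
    have hRnd : (PySem.List.sorted2 (PySem.Set.ofList F) (fun p => p.1) (fun p => p.2)).Nodup :=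
      ((PySem.List.sorted2_perm (PySem.Set.ofList F) _ _ false).nodup_iff).mpr
        (PySem.Set.nodup_ofList F)
    have hRlt : (PySem.List.sorted2 (PySem.Set.ofList F)
        (fun p => p.1) (fun p => p.2)).Pairwise (fun a b => a.1 < b.1) := by
      refine List.Pairwise.imp_of_mem ?_ ((pvSorted2_pairwise (PySem.Set.ofList F)).and hRnd)
      rintro a b ha hb ⟨hle, hne⟩
      have hda := hFdiag a ((hRmem a).mp ha)
      have hdb := hFdiag b ((hRmem b).mp hb)
      rcases lt_or_eq_of_le (pvRle_fst_le hle) with h | h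
      · exact h
      · exact absurd (Prod.ext h (by omega)) hne
    -- the greedy chain over the sorted list
    cases hS : PySem.List.sorted2 F (fun p => p.1) (fun p => p.2) with
    | nil =>
      obtain ⟨q, rest, hFq⟩ := List.exists_cons_of_ne_nil hFne
      have : q ∈ F := by rw [hFq]; exact List.mem_cons_self
      rw [← hSmem q, hS] at this
      exact absurd this List.not_mem_nil
    | cons h t =>
      rw [hS] at hSp hSmem
      rw [List.pairwise_cons] at hSp
      obtain ⟨hht, htp⟩ := hSp
      have hchain := pvChain best t [h] h
        (by rw [PySem.List.pyGetD_neg_one [h] (0, 0) (List.cons_ne_nil _ _)]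
            exact List.getLast_singleton _)
        (List.mem_cons_self)
        (List.pairwise_singleton _ _)
        (by intro x hx; rw [List.mem_singleton] at hx; subst hx; exact le_refl _)
        (by intro p hp; rw [List.mem_singleton] at hp; subst hp
            exact hFdiag p ((hSmem p).mp List.mem_cons_self))
        (fun p hp => hFdiag p ((hSmem p).mp (List.mem_cons_of_mem _ hp)))
        (fun p hp => pvRle_fst_le (hht p hp))
        (List.Pairwise.imp pvRle_fst_le htp)
      refine pvStrictUnique _ _ hchain.1 hRlt (fun x => ?_)
      rw [hchain.2 x, hRmem x, ← hSmem x]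
      simp
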